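-- pv_equiv track=rewrite | github.com/Alluvial-hungjury129/zen-ide | src/debugger/gdb_debugger.py | _mi_unescape
-- ===== SOURCE A (Python) =====
-- def _mi_unescape(s: str) -> str:
--     """Unescape a GDB/MI C-style string."""
--     # Process backslash first to avoid double-unescaping
--     result = []
--     i = 0
--     n = len(s)
--     while i < n:
--         if s[i] == "\\" and i + 1 < n:
--             c = s[i + 1]
--             if c == "n":
--                 result.append("\n")
--             elif c == "t":
--                 result.append("\t")
--             elif c == '"':
--                 result.append('"')
--             elif c == "\\":
--                 result.append("\\")
--             else:
--                 result.append(c)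
--             i += 2
--         else:
--             result.append(s[i])
--             i += 1
--     return "".join(result)
-- ===== SOURCE B (Python) =====
-- def _mi_unescape(s: str) -> str:
--     """Unescape a GDB/MI C-style string (chunked scan via str.find)."""
--     mapping = {'n': '\n', 't': '\t'}
--     out = []
--     i = 0
--     n = len(s)
--     while True:
--         j = s.find('\\', i)
--         if j == -1 or j == n - 1:
--             out.append(s[i:])
--             break
--         out.append(s[i:j])
--         c = s[j + 1]
--         out.append(mapping.get(c, c))
--         i = j + 2
--     return ''.join(out)
-- ===== Notes on version B (the rewrite author's own statement) =====
-- stated objective: faster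
-- what changed: Replaces A's char-by-char while loop (appending one character per iteration) with a chunked scan: str.find locates the next backslash, the whole literal slice is appended at once, and the escape character is translated through a dict lookup with a default that subsumes A's identity branches.
import Mathlib
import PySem

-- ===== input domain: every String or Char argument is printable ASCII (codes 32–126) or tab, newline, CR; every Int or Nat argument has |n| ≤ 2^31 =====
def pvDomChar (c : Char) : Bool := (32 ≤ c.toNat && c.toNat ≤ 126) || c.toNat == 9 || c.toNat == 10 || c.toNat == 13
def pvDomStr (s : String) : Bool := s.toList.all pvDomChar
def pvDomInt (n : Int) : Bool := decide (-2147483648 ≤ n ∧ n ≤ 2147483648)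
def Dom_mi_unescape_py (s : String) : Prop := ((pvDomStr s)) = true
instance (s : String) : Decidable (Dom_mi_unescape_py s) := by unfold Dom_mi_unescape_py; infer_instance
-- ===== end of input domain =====

-- B replaces A's char-by-char while loop by a chunked scan (find the next backslash,
-- copy the literal slice whole, translate the escape via a dict); objective: faster (measured).

-- ===== PORT A =====
-- A's while loop over index i: each step consumes one char, or two when the char is
-- '\' and i+1 < n; ported as structural recursion on the remaining characters.
def miLoopA : List Char → List Char
  | [] => []
  | a :: rest =>
    if a = '\\' then
      match rest with
      | c :: rest' =>
        (if c = 'n' then '\n'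
         else if c = 't' then '\t'
         else if c = '"' then '"'
         else if c = '\\' then '\\'
         else c) :: miLoopA rest'
      | [] => a :: miLoopA []      -- i + 1 < n fails: append s[i], i += 1
    else a :: miLoopA rest

def mi_unescape_py (s : String) : String := String.ofList (miLoopA s.toList)

-- ===== PORT B =====
-- B's escape table: mapping.get(c, c)
def miEsc (c : Char) : Char := PySem.Dict.getD (PySem.Dict.ofList [('n', '\n'), ('t', '\t')]) c c

-- B's loop: j = s.find('\\', i) together with the slices s[i:j] / s[i:] is exactly
-- takeWhile/dropWhile (≠ '\\') on the remaining characters.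
def miLoopB (l : List Char) : List Char :=
  let p := l.takeWhile (· ≠ '\\')
  match h : l.dropWhile (· ≠ '\\') with
  | _ :: c :: rest => p ++ miEsc c :: miLoopB rest   -- literal chunk, escaped char, continue at j+2
  | r => p ++ r                                      -- j == -1 or j == n-1: append s[i:], break
termination_by l.length
decreasing_by
  have h1 : (l.dropWhile (· ≠ '\\')).length ≤ l.length := List.length_dropWhile_le ..
  rw [h] at h1; simp at h1; omega

def mi_unescape_py_alt (s : String) : String := String.ofList (miLoopB s.toList)

-- ===== PRECONDITION & SPEC =====
def Spec_mi_unescape_py (s : String) (out : String) : Prop := out = mi_unescape_py_alt s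
instance (s : String) (out : String) : Decidable (Spec_mi_unescape_py s out) := by unfold Spec_mi_unescape_py; infer_instance

-- ===== CLAIM (what is proved, stated in full; the proofs are below) =====
def Claim_equal_mi_unescape_py : Prop := ∀ (s : String), Dom_mi_unescape_py s → Spec_mi_unescape_py s (mi_unescape_py s)

-- ===== LEMMAS AND PROOFS =====

-- first element surviving dropWhile falsifies the predicate
theorem dropWhile_head_false {α : Type} (l r : List α) (p : α → Bool) (b : α)
    (h : l.dropWhile p = b :: r) : p b = false := by
  induction l with
  | nil => simp at h
  | cons a t ih =>
    rw [List.dropWhile_cons] at h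
    split at h
    · exact ih h
    · next hp => cases h; simpa using hp

-- A's loop walks through a backslash-free prefix one char at a time, copying it.
theorem miLoopA_append_free (p t : List Char) (hp : ∀ c ∈ p, c ≠ '\\') :
    miLoopA (p ++ t) = p ++ miLoopA t := by
  induction p with
  | nil => rfl
  | cons a p ih =>
    have ha : a ≠ '\\' := hp a (by simp)
    rw [List.cons_append, miLoopA.eq_def]
    simp only [if_neg ha]
    rw [ih (fun c hc => hp c (by simp [hc])), List.cons_append]

-- A's escape translation agrees with B's table (A's '"' and '\\' branches are identities).
theorem miEsc_eq (c : Char) :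
    (if c = 'n' then '\n' else if c = 't' then '\t'
     else if c = '"' then '"' else if c = '\\' then '\\' else c) = miEsc c := by
  unfold miEsc
  by_cases h1 : c = 'n'
  · subst h1; decide
  by_cases h2 : c = 't'
  · subst h2; decide
  have e1 : ('n' == c) = false := by simp [Ne.symm h1]
  have e2 : ('t' == c) = false := by simp [Ne.symm h2]
  have hr : PySem.Dict.getD (PySem.Dict.ofList [('n', '\n'), ('t', '\t')]) c c = c := by
    simp [PySem.Dict.getD, PySem.Dict.ofList, PySem.Dict.update, PySem.Dict.empty,
          PySem.Dict.insert, PySem.Dict.get?, List.find?, e1, e2]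
  rw [hr, if_neg h1, if_neg h2]
  split_ifs with h3 h4 <;> simp_all

theorem miLoop_eq (l : List Char) : miLoopA l = miLoopB l := by
  generalize hn : l.length = n
  induction n using Nat.strong_induction_on generalizing l with
  | _ n ih =>
    subst hn
    have hsplit : l.takeWhile (· ≠ '\\') ++ l.dropWhile (· ≠ '\\') = l :=
      List.takeWhile_append_dropWhile
    have hfree : ∀ c ∈ l.takeWhile (· ≠ '\\'), c ≠ '\\' := by
      intro c hc
      simpa using List.mem_takeWhile_imp hc
    rw [miLoopB]
    cases hd : l.dropWhile (· ≠ '\\') with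
    | nil =>
      conv_lhs => rw [← hsplit, hd]
      rw [miLoopA_append_free _ _ hfree]
      rfl
    | cons b r =>
      have hb : b = '\\' := by
        have := dropWhile_head_false l r _ b hd
        simpa using this
      cases r with
      | nil =>
        conv_lhs => rw [← hsplit, hd]
        rw [miLoopA_append_free _ _ hfree, miLoopA.eq_def]
        simp [hb]
        rfl
      | cons c rest =>
        conv_lhs => rw [← hsplit, hd]
        rw [miLoopA_append_free _ _ hfree]
        have hlen : rest.length < l.length := by
          have h1 : (l.dropWhile (· ≠ '\\')).length ≤ l.length := List.length_dropWhile_le ..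
          rw [hd] at h1; simp at h1; omega
        rw [miLoopA.eq_def]
        simp only [hb]
        rw [miEsc_eq, ih rest.length hlen rest rfl]
        simp

-- ===== VERDICT (by name: the statement is the Claim_ definition above) =====
theorem mi_unescape_py_spec : Claim_equal_mi_unescape_py := by
  intro s _
  unfold Spec_mi_unescape_py mi_unescape_py mi_unescape_py_alt
  rw [miLoop_eq]
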